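-- pv_equiv track=rewrite | github.com/jordandoan/epi_practice | ch6_strings/6_1_str_int_conversion.py | int_str
-- ===== SOURCE A (Python) =====
-- import string
--
-- def int_str(n: int) -> str:
--     negative = False
--     if n < 0:
--         negative = True
--         # Need to make n positive because -1 // 10 = -1, not 0
--         n *= -1
--     ans = []
--     while n != 0:
--         # Take the rightmost digit and append to array
--         ans.append(string.digits[n % 10])
--         # Cut off right most digit
--         n = n // 10
--     if negative:
--         ans.append('-')
--     ans.reverse()
--     ans = "".join(ans)
--     return ans
-- ===== SOURCE B (Python) =====
-- import string
--
-- def int_str(n: int) -> str: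
--     # Recursive most-significant-digit-first construction (keeps 0 -> '').
--     if n < 0:
--         return '-' + int_str(-n)
--     if n == 0:
--         return ''
--     return int_str(n // 10) + string.digits[n % 10]
-- ===== Notes on version B (the rewrite author's own statement) =====
-- stated objective: simpler
-- what changed: Replaces the append-digits-then-reverse loop with a direct recursion on n//10 that builds the string most-significant-digit-first (no list, no reverse, no join), keeping the 0 -> '' behaviour and sign handling.
import Mathlib
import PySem

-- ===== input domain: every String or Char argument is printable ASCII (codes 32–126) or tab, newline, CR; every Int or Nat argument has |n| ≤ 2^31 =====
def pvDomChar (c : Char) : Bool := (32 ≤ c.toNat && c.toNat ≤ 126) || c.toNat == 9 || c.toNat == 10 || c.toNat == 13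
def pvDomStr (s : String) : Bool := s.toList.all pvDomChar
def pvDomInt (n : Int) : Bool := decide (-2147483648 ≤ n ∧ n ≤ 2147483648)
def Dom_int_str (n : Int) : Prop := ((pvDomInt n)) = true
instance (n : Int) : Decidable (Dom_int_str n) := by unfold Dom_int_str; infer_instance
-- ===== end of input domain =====

-- B replaces A's append-digits-then-reverse loop with a direct recursion on n//10
-- building the string most-significant-digit-first (objective: simpler); 0 -> "" kept.

-- ===== PORT A =====
-- string.digits[d] for 0 ≤ d < 10
def pvDigit (d : Nat) : Char := Char.ofNat (48 + d)

-- A's while loop: after the sign is stripped n is a nonnegative Int, carried here as a Nat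
-- (for n ≥ 0 Python's // and % on ints coincide with Nat division/mod).
def intStrLoop (n : Nat) (ans : List Char) : List Char :=
  if n = 0 then ans
  else intStrLoop (n / 10) (ans ++ [pvDigit (n % 10)])
decreasing_by exact Nat.div_lt_self (Nat.pos_of_ne_zero (by assumption)) (by norm_num)

def int_str (n : Int) : String :=
  let negative := n < 0
  let m := (if n < 0 then n * (-1) else n).toNat
  let ans := intStrLoop m []
  let ans := if negative then ans ++ ['-'] else ans
  String.ofList ans.reverse

-- ===== PORT B =====
-- B's recursion on n // 10 for n > 0, as a Nat recursion (n ≥ 0 here)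
def altRec (n : Nat) : List Char :=
  if n = 0 then []
  else altRec (n / 10) ++ [pvDigit (n % 10)]
decreasing_by exact Nat.div_lt_self (Nat.pos_of_ne_zero (by assumption)) (by norm_num)

def int_str_alt (n : Int) : String :=
  if n < 0 then "-" ++ String.ofList (altRec (-n).toNat)
  else String.ofList (altRec n.toNat)

-- ===== PRECONDITION & SPEC =====
def Spec_int_str (n : Int) (out : String) : Prop := out = int_str_alt n
instance (n : Int) (out : String) : Decidable (Spec_int_str n out) := by unfold Spec_int_str; infer_instance

-- ===== CLAIM (what is proved, stated in full; the proofs are below) =====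
def Claim_equal_int_str : Prop := ∀ (n : Int), Dom_int_str n → Spec_int_str n (int_str n)

-- ===== LEMMAS AND PROOFS =====
theorem loop_eq_altRec (n : Nat) : ∀ acc : List Char, intStrLoop n acc = acc ++ (altRec n).reverse := by
  induction n using Nat.strong_induction_on with
  | _ n ih =>
    intro acc
    rw [intStrLoop, altRec]
    by_cases h : n = 0
    · simp [h]
    · simp only [h]
      rw [ih (n / 10) (Nat.div_lt_self (Nat.pos_of_ne_zero h) (by norm_num))]
      simp

theorem ofList_cons_append (c : Char) (l : List Char) :
    String.ofList (c :: l) = String.ofList [c] ++ String.ofList l := by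
  rw [← String.ofList_append]; rfl

-- ===== VERDICT (by name: the statement is the Claim_ definition above) =====
theorem int_str_spec : Claim_equal_int_str := by
  intro n _
  unfold Spec_int_str int_str int_str_alt
  by_cases h : n < 0
  · simp only [h, if_pos]
    rw [loop_eq_altRec]
    have : n * (-1) = -n := by ring
    rw [this]
    simp only [List.nil_append, List.reverse_append, List.reverse_cons, List.reverse_nil,
      List.nil_append, List.reverse_reverse, List.singleton_append]
    rw [ofList_cons_append]
  · simp only [h]
    rw [loop_eq_altRec]
    simp
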